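-- pv_equiv track=rewrite | github.com/dbswl4951/baekjoon_algorithm | cafe24/ex3.py | solution
-- ===== SOURCE A (Python) =====
-- def solution(size):
--     result = []
--     for a in range(1,size//2):
--         for b in range((size-a)//2,a-1,-1):
--             c = size-a-b
--             if c<a+b:
--                 temp = sorted([a,b,c])
--                 if temp not in result: result.append(temp)
--     return len(result)
-- ===== SOURCE B (Python) =====
-- def solution(size):
--     # O(n): for each smallest side a, count valid middle sides b in closed form
--     count = 0
--     for a in range(1, size // 2):
--         hi = (size - a) // 2
--         lo = max(a, (size - 2 * a) // 2 + 1)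
--         if lo <= hi:
--             count += hi - lo + 1
--     return count
-- ===== Notes on version B (the rewrite author's own statement) =====
-- stated objective: faster
-- what changed: Replaced A's triple-cost scheme (enumerate every (a,b) pair, sort each candidate triple, and linearly scan a growing list to deduplicate) by a single O(n) pass that, for each smallest side a, counts the admissible middle sides b with a closed-form interval length and no lists at all.
import Mathlib
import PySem

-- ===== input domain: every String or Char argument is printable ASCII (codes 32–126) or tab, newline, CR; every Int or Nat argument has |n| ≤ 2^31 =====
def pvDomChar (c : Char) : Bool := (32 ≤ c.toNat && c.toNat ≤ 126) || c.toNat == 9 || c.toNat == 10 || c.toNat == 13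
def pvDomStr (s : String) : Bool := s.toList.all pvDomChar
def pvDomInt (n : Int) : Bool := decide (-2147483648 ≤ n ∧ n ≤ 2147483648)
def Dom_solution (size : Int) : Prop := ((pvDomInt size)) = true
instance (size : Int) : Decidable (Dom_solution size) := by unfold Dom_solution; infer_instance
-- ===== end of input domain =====

-- B replaces A's cubic "enumerate all (a,b), sort, dedup in a list" by a single O(n) pass
-- that counts the admissible middle sides b for each a in closed form (objective: faster).

-- ===== PORT A =====
-- body of A's inner 'for b' loop
def innerA (size a : Int) (res : List (List Int)) (b : Int) : List (List Int) :=
  let c := size - a - b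
  if c < a + b then
    let temp := PySem.List.sorted [a, b, c] (fun x => x) false
    if temp ∈ res then res else res ++ [temp]
  else res

def solution (size : Int) : Int :=
  let result : List (List Int) :=
    (PySem.List.pyRange 1 (PySem.Int.floordiv size 2) 1).foldl
      (fun res a =>
        (PySem.List.pyRange (PySem.Int.floordiv (size - a) 2) (a - 1) (-1)).foldl
          (innerA size a) res)
      []
  (result.length : Int)

-- ===== PORT B =====
def solution_alt (size : Int) : Int :=
  (PySem.List.pyRange 1 (PySem.Int.floordiv size 2) 1).foldl
    (fun count a =>
      let hi := PySem.Int.floordiv (size - a) 2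
      let lo := max a (PySem.Int.floordiv (size - 2 * a) 2 + 1)
      if lo ≤ hi then count + (hi - lo + 1) else count)
    0

-- ===== PRECONDITION & SPEC =====
def Spec_solution (size : Int) (out : Int) : Prop := out = solution_alt size
instance (size : Int) (out : Int) : Decidable (Spec_solution size out) := by unfold Spec_solution; infer_instance

-- ===== CLAIM (what is proved, stated in full; the proofs are below) =====
def Claim_equal_solution : Prop := ∀ (size : Int), Dom_solution size → Spec_solution size (solution size)

-- ===== LEMMAS AND PROOFS =====

lemma sorted3 (a b c : Int) (h1 : a ≤ b) (h2 : b ≤ c) :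
    PySem.List.sorted [a, b, c] (fun x => x) false = [a, b, c] := by
  apply PySem.List.sorted_eq_self_of_pairwise
  simp [List.pairwise_cons]
  omega

-- the inner fold appends exactly one fresh triple per b satisfying the triangle condition
lemma inner_fold (size a : Int) :
    ∀ (bl : List Int) (res : List (List Int)),
      (∀ b ∈ bl, a ≤ b ∧ 2 * b ≤ size - a) →
      bl.Pairwise (· > ·) →
      (∀ t ∈ res, ∀ b ∈ bl, t ≠ [a, b, size - a - b]) →
      (bl.foldl (innerA size a) res).length
        = res.length + bl.countP (fun b => decide (size - a - b < a + b))
      ∧ ∀ t ∈ bl.foldl (innerA size a) res,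
          t ∈ res ∨ ∃ b ∈ bl, t = [a, b, size - a - b] := by
  intro bl
  induction bl with
  | nil => intro res _ _ _; simp
  | cons b bl ih =>
    intro res hmem hpw hfresh
    have hb := hmem b (by simp)
    have hgt : ∀ x ∈ bl, x < b := by
      have := List.pairwise_cons.mp hpw
      exact fun x hx => this.1 x hx
    have hpw' := (List.pairwise_cons.mp hpw).2
    have hmem' : ∀ x ∈ bl, a ≤ x ∧ 2 * x ≤ size - a :=
      fun x hx => hmem x (by simp [hx])
    simp only [List.foldl_cons]
    by_cases hc : size - a - b < a + b
    · have hst : PySem.List.sorted [a, b, size - a - b] (fun x => x) false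
          = [a, b, size - a - b] := sorted3 _ _ _ hb.1 (by omega)
      have hnot : [a, b, size - a - b] ∉ res := fun h => hfresh _ h b (by simp) rfl
      have hstep : innerA size a res b = res ++ [[a, b, size - a - b]] := by
        simp [innerA, hc, hst, hnot]
      rw [hstep]
      have hfresh' : ∀ t ∈ res ++ [[a, b, size - a - b]], ∀ x ∈ bl,
          t ≠ [a, x, size - a - x] := by
        intro t ht x hx
        rcases List.mem_append.mp ht with h | h
        · exact hfresh t h x (by simp [hx])
        · simp at h
          subst h
          have := hgt x hx
          intro he
          simp only [List.cons.injEq] at he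
          omega
      obtain ⟨hlen, hsub⟩ := ih (res ++ [[a, b, size - a - b]]) hmem' hpw' hfresh'
      constructor
      · rw [hlen]
        simp [hc]
        omega
      · intro t ht
        rcases hsub t ht with h | ⟨x, hx, he⟩
        · rcases List.mem_append.mp h with h | h
          · exact Or.inl h
          · simp at h; exact Or.inr ⟨b, by simp, h⟩
        · exact Or.inr ⟨x, by simp [hx], he⟩
    · have hstep : innerA size a res b = res := by simp [innerA, hc]
      rw [hstep]
      have hfresh' : ∀ t ∈ res, ∀ x ∈ bl, t ≠ [a, x, size - a - x] :=
        fun t ht x hx => hfresh t ht x (by simp [hx])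
      obtain ⟨hlen, hsub⟩ := ih res hmem' hpw' hfresh'
      constructor
      · rw [hlen]; simp [hc]
      · intro t ht
        rcases hsub t ht with h | ⟨x, hx, he⟩
        · exact Or.inl h
        · exact Or.inr ⟨x, by simp [hx], he⟩

-- counting b ∈ [a, b) with lo0 ≤ b, in closed form
lemma countP_ge (lo0 : Int) :
    ∀ (n : Nat) (a b : Int), (b - a).toNat = n →
      (PySem.List.pyRange a b 1).countP (fun x => decide (lo0 ≤ x))
        = (b - max a lo0).toNat := by
  intro n
  induction n with
  | zero =>
    intro a b h
    have hba : b ≤ a := by omega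
    rw [PySem.List.pyRange_one_eq_nil hba]
    have : b - max a lo0 ≤ 0 := by
      rcases le_total a lo0 with h' | h' <;>
        [rw [max_eq_right h']; rw [max_eq_left h']] <;> omega
    simp; omega
  | succ n ih =>
    intro a b h
    have hab : a < b := by omega
    rw [PySem.List.pyRange_one_cons hab]
    rw [List.countP_cons]
    rw [ih (a + 1) b (by omega)]
    by_cases hla : lo0 ≤ a
    · rw [max_eq_left hla, max_eq_left (by omega)]
      simp [hla]; omega
    · rw [max_eq_right (by omega : a ≤ lo0), max_eq_right (by omega : a + 1 ≤ lo0)]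
      simp [hla]

-- the number of b counted by A's inner loop, as B computes it
lemma count_eq (size a : Int) :
    ((PySem.List.pyRange (PySem.Int.floordiv (size - a) 2) (a - 1) (-1)).countP
        (fun b => decide (size - a - b < a + b)) : Int)
      = (if max a (PySem.Int.floordiv (size - 2 * a) 2 + 1)
            ≤ PySem.Int.floordiv (size - a) 2
         then PySem.Int.floordiv (size - a) 2
              - max a (PySem.Int.floordiv (size - 2 * a) 2 + 1) + 1
         else 0) := by
  set hi := PySem.Int.floordiv (size - a) 2 with hhi
  set q := PySem.Int.floordiv (size - 2 * a) 2 with hq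
  have hqe := PySem.Int.floordiv_mul_add_mod (size - 2 * a) 2
  have hm0 := PySem.Int.mod_nonneg (size - 2 * a) (by norm_num : (0:Int) < 2)
  have hm1 := PySem.Int.mod_lt (size - 2 * a) (by norm_num : (0:Int) < 2)
  have hpred : (fun b => decide (size - a - b < a + b)) = (fun b => decide (q + 1 ≤ b)) := by
    funext b
    simp only [decide_eq_decide]
    omega
  rw [hpred, PySem.List.pyRange_neg_one_eq_reverse, List.countP_reverse]
  have : a - 1 + 1 = a := by ring
  rw [this]
  rw [countP_ge (q + 1) ((hi + 1) - a).toNat a (hi + 1) rfl]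
  rcases le_total a (q + 1) with h' | h'
  · rw [max_eq_right h']
    split_ifs <;> omega
  · rw [max_eq_left h']
    split_ifs <;> omega

-- the whole outer loop: A's result length tracks B's counter
lemma outer_fold (size : Int) :
    ∀ (al : List Int) (res : List (List Int)),
      (∀ a ∈ al, 1 ≤ a) →
      al.Pairwise (· < ·) →
      (∀ t ∈ res, ∀ a ∈ al, ∀ b : Int, t ≠ [a, b, size - a - b]) →
      ((al.foldl
          (fun res a =>
            (PySem.List.pyRange (PySem.Int.floordiv (size - a) 2) (a - 1) (-1)).foldl
              (innerA size a) res) res).length : Int)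
        = al.foldl
            (fun count a =>
              let hi := PySem.Int.floordiv (size - a) 2
              let lo := max a (PySem.Int.floordiv (size - 2 * a) 2 + 1)
              if lo ≤ hi then count + (hi - lo + 1) else count)
            (res.length : Int)
      ∧ ∀ t ∈ al.foldl
            (fun res a =>
              (PySem.List.pyRange (PySem.Int.floordiv (size - a) 2) (a - 1) (-1)).foldl
                (innerA size a) res) res,
          t ∈ res ∨ ∃ a ∈ al, ∃ b : Int, t = [a, b, size - a - b] := by
  intro al
  induction al with
  | nil => intro res _ _ _; simp
  | cons a al ih =>
    intro res h1 hpw hfresh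
    have hlt : ∀ x ∈ al, a < x := fun x hx => (List.pairwise_cons.mp hpw).1 x hx
    have hpw' := (List.pairwise_cons.mp hpw).2
    have h1' : ∀ x ∈ al, 1 ≤ x := fun x hx => h1 x (by simp [hx])
    simp only [List.foldl_cons]
    -- inner fold facts for this a
    set bl := PySem.List.pyRange (PySem.Int.floordiv (size - a) 2) (a - 1) (-1) with hbl
    have hmemb : ∀ b ∈ bl, a ≤ b ∧ 2 * b ≤ size - a := by
      intro b hb
      rw [hbl, PySem.List.mem_pyRange_neg_one] at hb
      constructor
      · omega
      · have := (PySem.Int.le_floordiv_iff_mul_le (a := size - a)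
          (b := 2) (q := b) (by norm_num)).mp hb.2
        omega
    have hpwb : bl.Pairwise (· > ·) := by
      rw [hbl, PySem.List.pyRange_neg_one_eq_reverse, List.pairwise_reverse]
      exact PySem.List.pairwise_lt_pyRange_one _ _
    have hfreshb : ∀ t ∈ res, ∀ b ∈ bl, t ≠ [a, b, size - a - b] :=
      fun t ht b _ => hfresh t ht a (by simp) b
    obtain ⟨hlen, hsub⟩ := inner_fold size a bl res hmemb hpwb hfreshb
    set res' := bl.foldl (innerA size a) res with hres'
    have hfresh' : ∀ t ∈ res', ∀ x ∈ al, ∀ b : Int, t ≠ [x, b, size - x - b] := by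
      intro t ht x hx b
      rcases hsub t ht with h | ⟨b', _, he⟩
      · exact hfresh t h x (by simp [hx]) b
      · subst he
        have := hlt x hx
        intro he'
        simp only [List.cons.injEq] at he'
        omega
    obtain ⟨hlen', hsub'⟩ := ih res' h1' hpw' hfresh'
    constructor
    · rw [hlen']
      congr 1
      rw [hlen]
      push_cast
      rw [count_eq size a]
      split_ifs <;> omega
    · intro t ht
      rcases hsub' t ht with h | ⟨x, hx, b, he⟩
      · rcases hsub t h with h' | ⟨b, _, he⟩
        · exact Or.inl h'
        · exact Or.inr ⟨a, by simp, b, he⟩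
      · exact Or.inr ⟨x, by simp [hx], b, he⟩

-- ===== VERDICT (by name: the statement is the Claim_ definition above) =====
theorem solution_spec : Claim_equal_solution := by
  intro size _
  unfold Spec_solution solution solution_alt
  have := outer_fold size (PySem.List.pyRange 1 (PySem.Int.floordiv size 2) 1) []
    (fun a ha => (PySem.List.mem_pyRange_one.mp ha).1)
    (PySem.List.pairwise_lt_pyRange_one _ _)
    (by simp)
  simpa using this.1
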